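-- pv_equiv track=rewrite | github.com/DGU-CBLAB/Generate_plan_producting | utils.py | index_count_dict
-- ===== SOURCE A (Python) =====
-- def index_count_dict(temp_list,version='normal'):
--     temp_index_list = []
--     temp_dict = {}
--     for i in range(len(temp_list)):
--         temp_index_list +=list(set(temp_list[i][2])) #사용되는 index list(중복 제거)
--
--     #if temp_index_list != list(set(temp_index_list)): #다른 조합간에 겹치는 index 존재할 경우
--     temp_index_list = list(set(temp_index_list)) #중복 제거 list
--     for i in temp_index_list: #dict 초기화
--         temp_dict[i] = 0
--
--     for i in range(len(temp_list)):
--         for j in range(len(temp_list[i][2])):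
--             if version == 'normal':
--                 temp_dict[temp_list[i][2][j]] += temp_list[i][1] #각 index가 얼마나 사용되지 입력
--             elif version =='addition':
--                 temp_dict[temp_list[i][2][j]] -= temp_list[i][5][j] #각 index가 얼마나 사용되지 입력
--
--     return temp_dict
-- ===== SOURCE B (Python) =====
-- def index_count_dict(temp_list, version='normal'):
--     # Group-then-reduce: one pass collects each key's list of deltas (no running
--     # sums during traversal), then the result is built by summing each group.
--     groups = {}
--     for row in temp_list:
--         for j, idx in enumerate(row[2]):
--             if version == 'normal':
--                 delta = row[1]
--             elif version == 'addition':
--                 delta = -row[5][j]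
--             else:
--                 delta = 0
--             g = groups.get(idx)
--             if g is None:
--                 groups[idx] = [delta]
--             else:
--                 g.append(delta)
--     return {k: sum(g) for k, g in groups.items()}
-- ===== Notes on version B (the rewrite author's own statement) =====
-- stated objective: alternative
-- what changed: A pre-collects the deduplicated key union, zero-initializes a dict, and keeps running counters with += in a nested pass; B is a group-then-reduce: one pass appends each occurrence's delta to its key's group list (no running sums, no initialization pass), then the result is built by summing each group.
import Mathlib
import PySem

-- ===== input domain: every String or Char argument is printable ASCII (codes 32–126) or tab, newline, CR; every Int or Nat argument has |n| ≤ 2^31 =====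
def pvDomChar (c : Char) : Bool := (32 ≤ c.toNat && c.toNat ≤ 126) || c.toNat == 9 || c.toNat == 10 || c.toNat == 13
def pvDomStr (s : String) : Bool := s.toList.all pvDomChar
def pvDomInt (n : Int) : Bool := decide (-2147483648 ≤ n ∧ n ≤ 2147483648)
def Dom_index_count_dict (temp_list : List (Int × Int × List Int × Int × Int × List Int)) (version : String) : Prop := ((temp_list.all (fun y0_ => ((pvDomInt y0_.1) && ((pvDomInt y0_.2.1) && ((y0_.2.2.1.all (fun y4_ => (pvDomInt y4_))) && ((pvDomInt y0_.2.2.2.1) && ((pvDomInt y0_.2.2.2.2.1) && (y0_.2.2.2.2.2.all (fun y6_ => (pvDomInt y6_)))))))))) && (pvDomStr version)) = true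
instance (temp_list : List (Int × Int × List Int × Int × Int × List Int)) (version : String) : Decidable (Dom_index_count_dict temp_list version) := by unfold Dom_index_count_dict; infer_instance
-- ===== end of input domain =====

-- B replaces A's dict-accumulation (collect keys, zero-initialize, nested += loop) by a
-- group-by: flatten once to an (index, delta) pair stream, then per-key sums (objective:
-- alternative; same return value, proved below).

-- ===== PORT A =====
def index_count_dict (temp_list : List (Int × Int × List Int × Int × Int × List Int)) (version : String) : List (Int × Int) :=
  -- temp_index_list += list(set(temp_list[i][2]))  for each i
  let temp_index_list : List Int :=
    temp_list.foldl (fun acc row => acc ++ (PySem.Set.ofList row.2.2.1 : List Int)) []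
  -- temp_index_list = list(set(temp_index_list))
  let temp_index_list : List Int := (PySem.Set.ofList temp_index_list : List Int)
  -- for i in temp_index_list: temp_dict[i] = 0
  let temp_dict0 : PySem.Dict Int Int :=
    temp_index_list.foldl (fun d i => d.insert i 0) PySem.Dict.empty
  -- nested accumulation loop; 'temp_dict[k] += / -= …' is Dict.modify (the key is always
  -- present, having been initialized above, so Python's KeyError cannot occur);
  -- pyGetD is exact: j ≥ 0 is in range for temp_list[i][2], and for temp_list[i][5] under Pre_
  let temp_dict : PySem.Dict Int Int :=
    temp_list.foldl (fun d row =>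
      (PySem.List.pyRange 0 (row.2.2.1.length : Int) 1).foldl (fun d j =>
        if version = "normal" then
          d.modify (PySem.List.pyGetD row.2.2.1 j 0) 0 (fun v => v + row.2.1)
        else if version = "addition" then
          d.modify (PySem.List.pyGetD row.2.2.1 j 0) 0
            (fun v => v - PySem.List.pyGetD row.2.2.2.2.2 j 0)
        else d) d) temp_dict0
  temp_dict.items

-- ===== PORT B =====
def index_count_dict_alt (temp_list : List (Int × Int × List Int × Int × Int × List Int)) (version : String) : List (Int × Int) :=
  -- group pass: g = groups.get(idx); if g is None: groups[idx] = [delta] else: g.append(delta)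
  -- (Python appends in place to the stored list; here that is writing back the extended list);
  -- pyGetD row[5][j] is exact under Pre_ (j in range)
  let groups : PySem.Dict Int (List Int) :=
    temp_list.foldl (fun groups row =>
      (PySem.List.enumerate row.2.2.1).foldl (fun groups p =>
        let delta : Int :=
          if version = "normal" then row.2.1
          else if version = "addition" then -(PySem.List.pyGetD row.2.2.2.2.2 p.1 0)
          else 0
        match groups.get? p.2 with
        | none => groups.insert p.2 [delta]
        | some g => groups.insert p.2 (g ++ [delta])) groups) PySem.Dict.empty
  -- {k: sum(g) for k, g in groups.items()}
  groups.items.map (fun kv => (kv.1, kv.2.sum))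

-- ===== PRECONDITION & SPEC =====
-- Pre_ excludes only inputs where A raises: with version == 'addition', a row whose list at
-- position 5 is shorter than its index list at position 2 makes temp_list[i][5][j] an IndexError.
def Pre_index_count_dict (temp_list : List (Int × Int × List Int × Int × Int × List Int)) (version : String) : Prop :=
  version = "addition" → ∀ row ∈ temp_list, row.2.2.1.length ≤ row.2.2.2.2.2.length
instance (temp_list : List (Int × Int × List Int × Int × Int × List Int)) (version : String) : Decidable (Pre_index_count_dict temp_list version) := by unfold Pre_index_count_dict; infer_instance
def pvWitness_index_count_dict : (List (Int × Int × List Int × Int × Int × List Int)) × String :=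
  ([(1, 2, [3, 3, 4], 5, 6, [7, 8, 9])], "addition")

def Spec_index_count_dict (temp_list : List (Int × Int × List Int × Int × Int × List Int)) (version : String) (out : List (Int × Int)) : Prop := out = index_count_dict_alt temp_list version
instance (temp_list : List (Int × Int × List Int × Int × Int × List Int)) (version : String) (out : List (Int × Int)) : Decidable (Spec_index_count_dict temp_list version out) := by unfold Spec_index_count_dict; infer_instance

-- ===== CLAIM (what is proved, stated in full; the proofs are below) =====
def Claim_equal_index_count_dict : Prop := ∀ (temp_list : List (Int × Int × List Int × Int × Int × List Int)) (version : String), Dom_index_count_dict temp_list version → Pre_index_count_dict temp_list version → Spec_index_count_dict temp_list version (index_count_dict temp_list version)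

-- ===== LEMMAS AND PROOFS =====

-- the flattened index stream: every index occurrence, in traversal order
def pvL (temp_list : List (Int × Int × List Int × Int × Int × List Int)) : List Int :=
  temp_list.flatMap (fun row => row.2.2.1)

-- per-row (index, operand) pair streams of A's nested loop
def pvPrsN (row : Int × Int × List Int × Int × Int × List Int) : List (Int × Int) :=
  (List.range row.2.2.1.length).map (fun k : Nat => (row.2.2.1.getD k 0, row.2.1))
def pvPrsA (row : Int × Int × List Int × Int × Int × List Int) : List (Int × Int) :=
  (List.range row.2.2.1.length).map
    (fun k : Nat => (row.2.2.1.getD k 0, PySem.List.pyGetD row.2.2.2.2.2 (k : Int) 0))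

-- B's flattened (index, delta) pair stream
def pvPairs (temp_list : List (Int × Int × List Int × Int × Int × List Int)) (version : String) : List (Int × Int) :=
  temp_list.flatMap (fun row =>
    (PySem.List.enumerate row.2.2.1).map (fun p =>
      (p.2, if version = "normal" then row.2.1
            else if version = "addition" then -(PySem.List.pyGetD row.2.2.2.2.2 p.1 0)
            else 0)))

-- (range n).map getD = the list itself
theorem pv_map_getD_range (xs : List Int) :
    (List.range xs.length).map (fun k : Nat => xs.getD k 0) = xs := by
  apply List.ext_getElem
  · simp
  · intro i h1 h2
    simp [List.getElem?_eq_getElem h2]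

theorem pv_fst_prsN (row : Int × Int × List Int × Int × Int × List Int) :
    (pvPrsN row).map Prod.fst = row.2.2.1 := by
  rw [pvPrsN, List.map_map]
  exact pv_map_getD_range row.2.2.1

theorem pv_fst_prsA (row : Int × Int × List Int × Int × Int × List Int) :
    (pvPrsA row).map Prod.fst = row.2.2.1 := by
  rw [pvPrsA, List.map_map]
  exact pv_map_getD_range row.2.2.1

-- enumerate as a map over range
theorem pv_enumerate_eq (xs : List Int) (s : Int) :
    PySem.List.enumerate xs s
      = (List.range xs.length).map (fun k : Nat => (s + (k : Int), xs.getD k 0)) := by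
  induction xs generalizing s with
  | nil => simp [PySem.List.enumerate]
  | cons x xs ih =>
    rw [PySem.List.enumerate_cons, ih]
    simp only [List.length_cons, List.range_succ_eq_map, List.map_cons, List.map_map]
    refine List.cons_eq_cons.mpr ⟨by simp, ?_⟩
    apply List.map_congr_left
    intro k hk
    simp only [Function.comp_apply, List.getD_cons_succ]
    push_cast
    ring_nf

-- A's inner loop (pyRange over indices, reading both lists at j) as a fold over range
theorem pv_A_inner {β : Type} (row2 row5 : List Int) (F : β → Int → Int → β) (d : β) :
    (PySem.List.pyRange 0 (row2.length : Int) 1).foldl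
        (fun d j => F d (PySem.List.pyGetD row2 j 0) (PySem.List.pyGetD row5 j 0)) d
      = (List.range row2.length).foldl
        (fun d k => F d (row2.getD k 0) (PySem.List.pyGetD row5 (k : Int) 0)) d := by
  rw [PySem.List.pyRange_one, List.foldl_map]
  simp

-- value of a modify-accumulate fold over a pair stream
theorem pv_getD_foldl_modify_op (g : Int → Int → Int) (l : List (Int × Int))
    (d : PySem.Dict Int Int) (k : Int) :
    (l.foldl (fun d p => d.modify p.1 0 (fun v => g v p.2)) d).getD k 0
      = (l.filter (fun p => p.1 = k)).foldl (fun v p => g v p.2) (d.getD k 0) := by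
  induction l generalizing d with
  | nil => simp
  | cons p l ih =>
    simp only [List.foldl_cons, List.filter_cons]
    rw [ih, PySem.Dict.getD_modify]
    by_cases h : p.1 = k
    · simp [h]
    · rw [if_neg (fun hh => h hh.symm)]
      simp [h]

-- zero-init fold value
theorem pv_getD_init (K : List Int) (d : PySem.Dict Int Int) (k : Int)
    (h : d.getD k 0 = 0) :
    (K.foldl (fun d i => d.insert i 0) d).getD k 0 = 0 := by
  induction K generalizing d with
  | nil => simpa using h
  | cons i K ih =>
    simp only [List.foldl_cons]
    exact ih _ (by rw [PySem.Dict.getD_insert]; split <;> simp [h])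

-- Set facts
theorem pv_update_ofList (s : PySem.Set Int) (b : List Int) :
    s.update (PySem.Set.ofList b : List Int) = s.update b := by
  rw [PySem.Set.update_eq_append_filter, PySem.Set.update_eq_append_filter,
    PySem.Set.ofList_ofList]

theorem pv_update_absorb (s : PySem.Set Int) (l : List Int) (h : ∀ x ∈ l, x ∈ s) :
    s.update l = s := by
  rw [PySem.Set.update_eq_append_filter]
  have h0 : (PySem.Set.ofList l : List Int).filter (fun y => !s.contains y) = [] := by
    rw [List.filter_eq_nil_iff]
    intro y hy
    have hm : y ∈ s := h y ((PySem.Set.mem_ofList l y).mp hy)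
    simp [hm]
  rw [h0, List.append_nil]

-- A's deduplicated index list is set(flattened indices)
theorem pv_keylist (temp_list : List (Int × Int × List Int × Int × Int × List Int))
    (acc : List Int) :
    PySem.Set.ofList
        (temp_list.foldl (fun acc row => acc ++ (PySem.Set.ofList row.2.2.1 : List Int)) acc)
      = PySem.Set.update (PySem.Set.ofList acc) (pvL temp_list) := by
  induction temp_list generalizing acc with
  | nil => simp [pvL, PySem.Set.update_nil]
  | cons row tl ih =>
    simp only [pvL, List.foldl_cons, List.flatMap_cons] at *
    rw [ih, PySem.Set.ofList_append, PySem.Set.update_append, pv_update_ofList]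

theorem pv_foldl_const {β γ : Type} (l : List γ) (d : β) :
    l.foldl (fun d _ => d) d = d := by
  induction l generalizing d with
  | nil => rfl
  | cons x l ih => exact ih d

theorem pv_ofList_update_self (L : List Int) :
    PySem.Set.update (PySem.Set.ofList L) L = PySem.Set.ofList L :=
  pv_update_absorb _ _ (fun x hx => (PySem.Set.mem_ofList L x).mpr hx)

theorem pv_templist (temp_list : List (Int × Int × List Int × Int × Int × List Int)) :
    (PySem.Set.ofList
        (temp_list.foldl (fun acc row => acc ++ (PySem.Set.ofList row.2.2.1 : List Int)) [])
      : List Int) = (PySem.Set.ofList (pvL temp_list) : List Int) := by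
  rw [pv_keylist temp_list []]
  show PySem.Set.update (PySem.Set.ofList ([] : List Int)) (pvL temp_list) = _
  rw [PySem.Set.ofList_nil]
  exact PySem.Set.update_empty (pvL temp_list)

theorem pv_d0_keys (K : List Int) :
    ((K.foldl (fun d i => d.insert i 0) (PySem.Dict.empty : PySem.Dict Int Int)).keys
      : List Int) = (PySem.Set.ofList K : List Int) := by
  have h := PySem.Dict.keys_foldl_insert K (fun _ _ => (0 : Int))
    (PySem.Dict.empty : PySem.Dict Int Int)
  rw [PySem.Dict.keys_empty] at h
  exact h.trans (PySem.Set.update_empty K)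

-- fold sums
theorem pv_foldl_add_snd (l : List (Int × Int)) (a : Int) :
    l.foldl (fun v p => v + p.2) a = a + (l.map Prod.snd).sum := by
  induction l generalizing a with
  | nil => simp
  | cons p l ih => simp [ih]; ring

theorem pv_foldl_sub_snd (l : List (Int × Int)) (a : Int) :
    l.foldl (fun v p => v - p.2) a = a - (l.map Prod.snd).sum := by
  induction l generalizing a with
  | nil => simp
  | cons p l ih => simp [ih]; ring

-- B's output, in terms of pvPairs and pvL
theorem pv_pairs_fst (temp_list : List (Int × Int × List Int × Int × Int × List Int))
    (version : String) : (pvPairs temp_list version).map Prod.fst = pvL temp_list := by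
  rw [pvPairs, pvL, List.map_flatMap]
  apply List.flatMap_congr
  intro row _
  rw [List.map_map]
  exact PySem.List.map_snd_enumerate row.2.2.1 0

-- one grouping step: branch on get? = insert of the extended group
theorem pv_upsert_step (g : PySem.Dict Int (List Int)) (k δ : Int) :
    (match g.get? k with
      | none => g.insert k [δ]
      | some l => g.insert k (l ++ [δ]))
      = g.insert k (g.getD k [] ++ [δ]) := by
  rcases h : g.get? k with - | l
  · simp [PySem.Dict.getD_eq_get?_getD, h]
  · simp [PySem.Dict.getD_eq_get?_getD, h]

-- per-key group of an insert-append fold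
theorem pv_getD_foldl_insert_app (l : List (Int × Int)) (d : PySem.Dict Int (List Int))
    (k : Int) :
    (l.foldl (fun d p => d.insert p.1 (d.getD p.1 [] ++ [p.2])) d).getD k []
      = d.getD k [] ++ (l.filter (fun p => p.1 = k)).map Prod.snd := by
  induction l generalizing d with
  | nil => simp
  | cons p l ih =>
    simp only [List.foldl_cons, List.filter_cons]
    rw [ih, PySem.Dict.getD_insert]
    by_cases h : p.1 = k
    · simp [h]
    · rw [if_neg (fun hh => h hh.symm)]
      simp [h]

theorem pv_B_eq (temp_list : List (Int × Int × List Int × Int × Int × List Int))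
    (version : String) :
    index_count_dict_alt temp_list version
      = (PySem.Set.ofList (pvL temp_list) : List Int).map
          (fun k => (k, (((pvPairs temp_list version).filter (fun p => p.1 = k)).map Prod.snd).sum)) := by
  rw [index_count_dict_alt]
  simp only [pv_upsert_step]
  have hrow : ∀ (row : Int × Int × List Int × Int × Int × List Int)
      (g : PySem.Dict Int (List Int)),
      (PySem.List.enumerate row.2.2.1).foldl (fun g p =>
        g.insert p.2
          ((g.getD p.2 []) ++ [if version = "normal" then row.2.1
              else if version = "addition" then -(PySem.List.pyGetD row.2.2.2.2.2 p.1 0)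
              else 0])) g
      = ((PySem.List.enumerate row.2.2.1).map (fun p =>
          (p.2, if version = "normal" then row.2.1
                else if version = "addition" then -(PySem.List.pyGetD row.2.2.2.2.2 p.1 0)
                else 0))).foldl (fun g q => g.insert q.1 (g.getD q.1 [] ++ [q.2])) g := by
    intro row g
    rw [List.foldl_map]
  simp only [hrow]
  rw [← List.foldl_flatMap]
  rw [show (temp_list.flatMap fun row =>
      (PySem.List.enumerate row.2.2.1).map (fun p =>
        (p.2, if version = "normal" then row.2.1
              else if version = "addition" then -(PySem.List.pyGetD row.2.2.2.2.2 p.1 0)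
              else 0))) = pvPairs temp_list version from rfl]
  have hkeys : ((pvPairs temp_list version).foldl
      (fun g q => g.insert q.1 (g.getD q.1 [] ++ [q.2]))
      (PySem.Dict.empty : PySem.Dict Int (List Int))).keys
      = (PySem.Set.ofList (pvL temp_list) : List Int) := by
    have h := PySem.Dict.keys_foldl_insert_key (pvPairs temp_list version) Prod.fst
      (fun g q => g.getD q.1 [] ++ [q.2]) (PySem.Dict.empty : PySem.Dict Int (List Int))
    rw [h, PySem.Dict.keys_empty, pv_pairs_fst]
    exact PySem.Set.update_empty (pvL temp_list)
  rw [PySem.Dict.items_eq_map_keys _ (by rw [hkeys]; exact PySem.Set.nodup_ofList _) [],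
    hkeys, List.map_map]
  apply List.map_congr_left
  intro k _
  simp only [Function.comp_apply]
  rw [pv_getD_foldl_insert_app, PySem.Dict.getD_empty, List.nil_append]

-- pvPairs per version
theorem pv_pairs_normal (temp_list : List (Int × Int × List Int × Int × Int × List Int)) :
    pvPairs temp_list "normal" = temp_list.flatMap pvPrsN := by
  rw [pvPairs]
  apply List.flatMap_congr
  intro row _
  simp only [String.reduceEq, reduceIte]
  rw [pv_enumerate_eq, List.map_map, pvPrsN]
  apply List.map_congr_left
  intro k _
  rfl

theorem pv_pairs_addition (temp_list : List (Int × Int × List Int × Int × Int × List Int)) :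
    pvPairs temp_list "addition"
      = (temp_list.flatMap pvPrsA).map (fun p => (p.1, -p.2)) := by
  rw [pvPairs, List.map_flatMap]
  apply List.flatMap_congr
  intro row _
  simp only [String.reduceEq, reduceIte]
  rw [pv_enumerate_eq, List.map_map, pvPrsA, List.map_map]
  apply List.map_congr_left
  intro k _
  simp

theorem pv_pairs_other (temp_list : List (Int × Int × List Int × Int × Int × List Int))
    (version : String) (h1 : version ≠ "normal") (h2 : version ≠ "addition") :
    pvPairs temp_list version = (pvL temp_list).map (fun x => (x, (0 : Int))) := by
  rw [pvPairs, pvL, List.map_flatMap]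
  apply List.flatMap_congr
  intro row _
  simp only [h1, h2, if_false]
  rw [show (fun p : Int × Int => (p.2, (0:Int))) = ((fun x : Int => (x, (0:Int))) ∘ Prod.snd) from rfl,
    ← List.map_map]
  rw [PySem.List.map_snd_enumerate row.2.2.1 0]

-- filter commutes with a fst-preserving map
theorem pv_filter_map_fst {α : Type} (f : Int × Int → Int × α) (l : List (Int × Int)) (k : Int)
    (hf : ∀ p, (f p).1 = p.1) :
    (l.map f).filter (fun p => p.1 = k) = (l.filter (fun p => p.1 = k)).map f := by
  rw [List.filter_map]
  congr 1
  apply List.filter_congr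
  intro p _
  simp [hf p]

theorem pv_sum_map_neg (l : List (Int × Int)) :
    ((l.map (fun p : Int × Int => (p.1, -p.2))).map Prod.snd).sum
      = -((l.map Prod.snd).sum) := by
  induction l with
  | nil => simp
  | cons p l ih => simp only [List.map_cons, List.sum_cons, ih]; ring

-- A's accumulated dict, generically: keys and per-key values
theorem pv_A_items (prs : List (Int × Int)) (g : Int → Int → Int)
    (temp_list : List (Int × Int × List Int × Int × Int × List Int))
    (hfst : prs.map Prod.fst = pvL temp_list) :
    (prs.foldl (fun d p => d.modify p.1 0 (fun v => g v p.2))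
        ((PySem.Set.ofList (temp_list.foldl
          (fun acc row => acc ++ (PySem.Set.ofList row.2.2.1 : List Int)) []) : List Int).foldl
          (fun d i => d.insert i 0) PySem.Dict.empty)).items
      = (PySem.Set.ofList (pvL temp_list) : List Int).map
          (fun k => (k, (prs.filter (fun p => p.1 = k)).foldl (fun v p => g v p.2) 0)) := by
  set d0 : PySem.Dict Int Int :=
    (PySem.Set.ofList (temp_list.foldl
      (fun acc row => acc ++ (PySem.Set.ofList row.2.2.1 : List Int)) []) : List Int).foldl
      (fun d i => d.insert i 0) PySem.Dict.empty with hd0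
  have hk0 : d0.keys = (PySem.Set.ofList (pvL temp_list) : List Int) := by
    rw [hd0, pv_d0_keys, pv_templist, PySem.Set.ofList_ofList]
  have hkeys : (prs.foldl (fun d p => d.modify p.1 0 (fun v => g v p.2)) d0).keys
      = (PySem.Set.ofList (pvL temp_list) : List Int) := by
    have h := PySem.Dict.keys_foldl_modify_key prs Prod.fst (0 : Int)
      (fun _ p => fun v => g v p.2) d0
    rw [h, hk0, hfst]
    exact pv_ofList_update_self (pvL temp_list)
  rw [PySem.Dict.items_eq_map_keys _ (by rw [hkeys]; exact PySem.Set.nodup_ofList _) 0, hkeys]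
  apply List.map_congr_left
  intro k _
  rw [pv_getD_foldl_modify_op]
  rw [show d0.getD k 0 = 0 from by
    rw [hd0]; exact pv_getD_init _ _ _ (PySem.Dict.getD_empty k 0)]

-- the three version cases
theorem pv_case_normal (temp_list : List (Int × Int × List Int × Int × Int × List Int)) :
    index_count_dict temp_list "normal" = index_count_dict_alt temp_list "normal" := by
  have hA : ∀ (row : Int × Int × List Int × Int × Int × List Int) (d : PySem.Dict Int Int),
      (PySem.List.pyRange 0 (row.2.2.1.length : Int) 1).foldl
        (fun d j => d.modify (PySem.List.pyGetD row.2.2.1 j 0) 0 (fun v => v + row.2.1)) d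
      = (pvPrsN row).foldl (fun d p => d.modify p.1 0 (fun v => v + p.2)) d := by
    intro row d
    refine (pv_A_inner row.2.2.1 row.2.2.2.2.2
      (fun d x _ => d.modify x 0 (fun v => v + row.2.1)) d).trans ?_
    rw [pvPrsN, List.foldl_map]
  rw [pv_B_eq, pv_pairs_normal]
  simp only [index_count_dict, reduceIte]
  simp only [hA]
  rw [← List.foldl_flatMap]
  rw [pv_A_items (temp_list.flatMap pvPrsN) (fun v w => v + w) temp_list
    (by rw [pvL, List.map_flatMap]; exact List.flatMap_congr (fun row _ => pv_fst_prsN row))]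
  apply List.map_congr_left
  intro k _
  rw [pv_foldl_add_snd]
  simp

theorem pv_case_addition (temp_list : List (Int × Int × List Int × Int × Int × List Int)) :
    index_count_dict temp_list "addition" = index_count_dict_alt temp_list "addition" := by
  have hA : ∀ (row : Int × Int × List Int × Int × Int × List Int) (d : PySem.Dict Int Int),
      (PySem.List.pyRange 0 (row.2.2.1.length : Int) 1).foldl
        (fun d j => d.modify (PySem.List.pyGetD row.2.2.1 j 0) 0
          (fun v => v - PySem.List.pyGetD row.2.2.2.2.2 j 0)) d
      = (pvPrsA row).foldl (fun d p => d.modify p.1 0 (fun v => v - p.2)) d := by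
    intro row d
    refine (pv_A_inner row.2.2.1 row.2.2.2.2.2
      (fun d x y => d.modify x 0 (fun v => v - y)) d).trans ?_
    rw [pvPrsA, List.foldl_map]
  rw [pv_B_eq, pv_pairs_addition]
  simp only [index_count_dict, String.reduceEq, reduceIte]
  simp only [hA]
  rw [← List.foldl_flatMap]
  rw [pv_A_items (temp_list.flatMap pvPrsA) (fun v w => v - w) temp_list
    (by rw [pvL, List.map_flatMap]; exact List.flatMap_congr (fun row _ => pv_fst_prsA row))]
  apply List.map_congr_left
  intro k _
  rw [pv_filter_map_fst (fun p : Int × Int => (p.1, -p.2)) _ k (fun p => rfl), pv_sum_map_neg, pv_foldl_sub_snd]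
  simp

theorem pv_case_other (temp_list : List (Int × Int × List Int × Int × Int × List Int))
    (version : String) (h1 : version ≠ "normal") (h2 : version ≠ "addition") :
    index_count_dict temp_list version = index_count_dict_alt temp_list version := by
  rw [pv_B_eq, pv_pairs_other temp_list version h1 h2]
  simp only [index_count_dict, h1, h2, if_false]
  simp only [pv_foldl_const]
  rw [PySem.Dict.items_eq_map_keys _ (by rw [pv_d0_keys]; exact PySem.Set.nodup_ofList _) 0,
    pv_d0_keys, pv_templist, PySem.Set.ofList_ofList]
  apply List.map_congr_left
  intro k _
  rw [pv_getD_init _ _ _ (PySem.Dict.getD_empty k 0)]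
  refine congrArg (fun v => (k, v)) ?_
  symm
  apply List.sum_eq_zero
  intro x hx
  simp only [List.mem_map, List.mem_filter] at hx
  obtain ⟨p, ⟨⟨y, hy, rfl⟩, -⟩, rfl⟩ := hx
  rfl

-- ===== VERDICT (by name: the statement is the Claim_ definition above) =====
theorem index_count_dict_spec : Claim_equal_index_count_dict := by
  intro temp_list version _ _
  unfold Spec_index_count_dict
  by_cases h1 : version = "normal"
  · subst h1; exact pv_case_normal temp_list
  · by_cases h2 : version = "addition"
    · subst h2; exact pv_case_addition temp_list
    · exact pv_case_other temp_list version h1 h2
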